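-- pv_equiv track=rewrite | github.com/GianLucaSpagnolo/TDA_cursada | tp2/ej1/ejercicio_1_con_lista_de_opt.py | seleccion_de_trabajos
-- ===== SOURCE A (Python) =====
-- def elegir_trabajo_primera_semana(opt: list, seleccionados: list, trabajos_tranquilos: list, trabajos_estresantes: list) -> None:
--
--     opt[1] = max(trabajos_tranquilos[1], trabajos_estresantes[1])
--     if opt[1] == trabajos_tranquilos[1]:
--         seleccionados.append("t1")
--     else:
--         seleccionados.append("e1")
--
-- def elegir_trabajo_segunda_semana(opt: list, seleccionados: list, trabajos_tranquilos: list, trabajos_estresantes: list) -> None: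
--
--     opt[2] = max(opt[1] + trabajos_tranquilos[2], trabajos_estresantes[2])
--     if opt[2] == trabajos_tranquilos[2] + opt[1]:
--         seleccionados.append("t2")
--     else:
--         seleccionados.append("e2")
--
-- def elegir_trabajo(opt: list, i: int, seleccionados: list, trabajos_tranquilos: list, trabajos_estresantes: list) -> None:
--
--     opt[i] = max(opt[i - 1] + trabajos_tranquilos[i], opt[i - 2] + trabajos_estresantes[i])
--     if opt[i] == trabajos_tranquilos[i] + opt[i - 1]:
--         seleccionados.append(f"t{i}")
--     else:
--         seleccionados.append(f"e{i}")
--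
-- def ajustar_lista_seleccionados(seleccionados: list) -> list:
--
--     aux: list = []
--     i: int = len(seleccionados) - 1
--
--     # Recorro la lista de fin a principio, si encuentro un trabajo estresante, ignoro el inmediatamente anterior y continuo iterando.
--     while i > 0:
--         aux.append(seleccionados[i])
--         if "e" == seleccionados[i][0]:
--             i -= 1
--         i -= 1
--     aux.reverse()
--
--     return aux
--
-- def seleccion_de_trabajos(trabajos_tranquilos: list, trabajos_estresantes: list) -> tuple:
--
--     # Agrego un 0 en el indice 0 para "descartarlo" (usaremos a partir del indice 1 para simplificar)
--     trabajos_tranquilos.insert(0, 0)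
--     trabajos_estresantes.insert(0, 0)
--
--     n: int = len(trabajos_tranquilos)
--     opt: list = [0] * n
--     seleccionados: list = [0]
--
--     elegir_trabajo_primera_semana(opt, seleccionados, trabajos_tranquilos, trabajos_estresantes)
--     elegir_trabajo_segunda_semana(opt, seleccionados, trabajos_tranquilos, trabajos_estresantes)
--
--     for i in range(3, n):
--         elegir_trabajo(opt, i, seleccionados, trabajos_tranquilos, trabajos_estresantes)
--     seleccionados = ajustar_lista_seleccionados(seleccionados)
--
--     return opt[n - 1], seleccionados
-- ===== SOURCE B (Python) =====
-- def seleccion_de_trabajos(trabajos_tranquilos, trabajos_estresantes):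
--     # Same in-place mutation as the original: a 0 is inserted at index 0 of both lists.
--     trabajos_tranquilos.insert(0, 0)
--     trabajos_estresantes.insert(0, 0)
--
--     n = len(trabajos_tranquilos)
--
--     # Uniform DP fill (opt[-1] treated as 0), no per-week special cases.
--     opt = [0]
--     for i in range(1, n):
--         prev2 = opt[i - 2] if i >= 2 else 0
--         opt.append(max(opt[i - 1] + trabajos_tranquilos[i],
--                        prev2 + trabajos_estresantes[i]))
--
--     # Reconstruct the selection by backtracking through opt (no forward log, no filter pass).
--     picks = []
--     i = n - 1
--     while i >= 1:
--         if opt[i] == trabajos_tranquilos[i] + opt[i - 1]: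
--             picks.append("t%d" % i)
--             i -= 1
--         else:
--             picks.append("e%d" % i)
--             i -= 2
--     picks.reverse()
--
--     return opt[n - 1], picks
-- ===== Notes on version B (the rewrite author's own statement) =====
-- stated objective: simpler
-- what changed: B replaces A's per-week helper functions, the forward 'seleccionados' log and the backward filtering pass (ajustar_lista_seleccionados) by a uniform one-pass DP fill (treating opt[-1] as 0) followed by direct backtracking over opt to reconstruct the picks.
import Mathlib
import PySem

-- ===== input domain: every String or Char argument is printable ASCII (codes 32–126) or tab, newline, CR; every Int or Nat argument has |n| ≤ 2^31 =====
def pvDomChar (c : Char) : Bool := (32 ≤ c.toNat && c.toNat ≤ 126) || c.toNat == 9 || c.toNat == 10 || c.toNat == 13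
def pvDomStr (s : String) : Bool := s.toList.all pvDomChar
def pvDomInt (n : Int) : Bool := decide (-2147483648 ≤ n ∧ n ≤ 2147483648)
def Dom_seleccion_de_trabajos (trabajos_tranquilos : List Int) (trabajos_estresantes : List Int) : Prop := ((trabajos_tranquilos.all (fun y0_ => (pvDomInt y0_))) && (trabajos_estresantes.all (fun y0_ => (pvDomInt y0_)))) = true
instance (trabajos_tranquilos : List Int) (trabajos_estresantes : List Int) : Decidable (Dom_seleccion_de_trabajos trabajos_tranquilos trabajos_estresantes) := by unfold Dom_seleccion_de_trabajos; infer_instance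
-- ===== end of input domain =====

-- B replaces A's per-week helper functions, forward selection log and backward filtering pass by a
-- uniform one-pass DP fill plus direct backtracking over opt (objective: simpler). Like A, B inserts
-- a 0 at the front of both argument lists in place; the equivalence proved is about the return value.

-- ===== PORT A =====
-- helper elegir_trabajo_primera_semana (opt/seleccionados are threaded as state instead of mutated)
def pvElegirPrimera (opt : List Int) (sel : List String) (t e : List Int) :
    List Int × List String :=
  let opt := PySem.List.pySetD opt 1 (max (PySem.List.pyGetD t 1 0) (PySem.List.pyGetD e 1 0))
  if PySem.List.pyGetD opt 1 0 = PySem.List.pyGetD t 1 0 then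
    (opt, sel ++ [String.ofList ['t', '1']])
  else
    (opt, sel ++ [String.ofList ['e', '1']])

-- helper elegir_trabajo_segunda_semana
def pvElegirSegunda (opt : List Int) (sel : List String) (t e : List Int) :
    List Int × List String :=
  let opt := PySem.List.pySetD opt 2
    (max (PySem.List.pyGetD opt 1 0 + PySem.List.pyGetD t 2 0) (PySem.List.pyGetD e 2 0))
  if PySem.List.pyGetD opt 2 0 = PySem.List.pyGetD t 2 0 + PySem.List.pyGetD opt 1 0 then
    (opt, sel ++ [String.ofList ['t', '2']])
  else
    (opt, sel ++ [String.ofList ['e', '2']])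

-- helper elegir_trabajo ; f"t{i}" = 't' followed by str(i)
def pvElegir (opt : List Int) (i : Int) (sel : List String) (t e : List Int) :
    List Int × List String :=
  let opt := PySem.List.pySetD opt i
    (max (PySem.List.pyGetD opt (i - 1) 0 + PySem.List.pyGetD t i 0)
         (PySem.List.pyGetD opt (i - 2) 0 + PySem.List.pyGetD e i 0))
  if PySem.List.pyGetD opt i 0 = PySem.List.pyGetD t i 0 + PySem.List.pyGetD opt (i - 1) 0 then
    (opt, sel ++ [String.ofList ('t' :: PySem.Int.toChars i)])
  else
    (opt, sel ++ [String.ofList ('e' :: PySem.Int.toChars i)])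

-- helper ajustar_lista_seleccionados: the while loop (i > 0; i -= 1 / i -= 2), appended order.
-- In Python i can reach -1; with Nat subtraction both 0 and -1 land on the terminating case 0.
def pvAjustarAux (sel : List String) : Nat → List String
  | 0 => []
  | 1 =>
    let s := PySem.List.pyGetD sel 1 (String.ofList [])
    if PySem.Str.pyGet? s 0 = some 'e' then s :: [] else s :: []
  | (i + 2) =>
    let s := PySem.List.pyGetD sel ((i : Int) + 2) (String.ofList [])
    if PySem.Str.pyGet? s 0 = some 'e' then
      s :: pvAjustarAux sel i
    else
      s :: pvAjustarAux sel (i + 1)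

def pvAjustar (sel : List String) : List String :=
  (pvAjustarAux sel (sel.length - 1)).reverse

-- main; xs.insert(0, v) at index 0 is exactly cons; the initial seleccionados entry 0 (an int,
-- never read back by ajustar) is carried as the placeholder string "0".
def seleccion_de_trabajos (trabajos_tranquilos : List Int) (trabajos_estresantes : List Int) :
    Int × List String :=
  let t := (0 : Int) :: trabajos_tranquilos
  let e := (0 : Int) :: trabajos_estresantes
  let n : Nat := t.length
  let opt : List Int := List.replicate n 0
  let sel : List String := [String.ofList ['0']]
  let p1 := pvElegirPrimera opt sel t e
  let p2 := pvElegirSegunda p1.1 p1.2 t e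
  let pr := (PySem.List.pyRange 3 (n : Int) 1).foldl (fun st i => pvElegir st.1 i st.2 t e) p2
  (PySem.List.pyGetD pr.1 ((n : Int) - 1) 0, pvAjustar pr.2)

-- ===== PORT B =====
-- the uniform DP fill: for i in range(1, n): opt.append(max(opt[i-1]+t[i], (opt[i-2] if i>=2 else 0)+e[i]))
def pvFillOpt (t e : List Int) (n : Nat) : List Int :=
  (PySem.List.pyRange 1 (n : Int) 1).foldl (fun opt i =>
    let prev2 : Int := if 2 ≤ i then PySem.List.pyGetD opt (i - 2) 0 else 0
    opt ++ [max (PySem.List.pyGetD opt (i - 1) 0 + PySem.List.pyGetD t i 0)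
                (prev2 + PySem.List.pyGetD e i 0)]) [0]

-- the backtracking while loop (i >= 1; i -= 1 / i -= 2), appended order.
-- In Python i can reach -1 or 0; with Nat subtraction both land on the terminating case 0.
def pvBacktrack (opt t : List Int) : Nat → List String
  | 0 => []
  | 1 =>
    if PySem.List.pyGetD opt 1 0 = PySem.List.pyGetD t 1 0 + PySem.List.pyGetD opt 0 0 then
      String.ofList ('t' :: PySem.Int.toChars 1) :: []
    else
      String.ofList ('e' :: PySem.Int.toChars 1) :: []
  | (i + 2) =>
    if PySem.List.pyGetD opt ((i : Int) + 2) 0 =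
        PySem.List.pyGetD t ((i : Int) + 2) 0 + PySem.List.pyGetD opt ((i : Int) + 1) 0 then
      String.ofList ('t' :: PySem.Int.toChars ((i : Int) + 2)) :: pvBacktrack opt t (i + 1)
    else
      String.ofList ('e' :: PySem.Int.toChars ((i : Int) + 2)) :: pvBacktrack opt t i

def seleccion_de_trabajos_alt (trabajos_tranquilos : List Int) (trabajos_estresantes : List Int) :
    Int × List String :=
  let t := (0 : Int) :: trabajos_tranquilos
  let e := (0 : Int) :: trabajos_estresantes
  let n : Nat := t.length
  let opt := pvFillOpt t e n
  (PySem.List.pyGetD opt ((n : Int) - 1) 0, (pvBacktrack opt t (n - 1)).reverse)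

-- ===== PRECONDITION & SPEC =====
-- A raises IndexError when len(trabajos_tranquilos) < 2 (the unconditional week-1/week-2 accesses)
-- or when len(trabajos_estresantes) < len(trabajos_tranquilos); Pre_ excludes exactly those.
def Pre_seleccion_de_trabajos (trabajos_tranquilos : List Int) (trabajos_estresantes : List Int) : Prop :=
  2 ≤ trabajos_tranquilos.length ∧ trabajos_tranquilos.length ≤ trabajos_estresantes.length

instance (trabajos_tranquilos : List Int) (trabajos_estresantes : List Int) :
    Decidable (Pre_seleccion_de_trabajos trabajos_tranquilos trabajos_estresantes) := by
  unfold Pre_seleccion_de_trabajos; infer_instance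

def pvWitness_seleccion_de_trabajos : List Int × List Int := ([3, 1, 4], [5, 2, 6])

def Spec_seleccion_de_trabajos (trabajos_tranquilos : List Int) (trabajos_estresantes : List Int)
    (out : Int × List String) : Prop :=
  out = seleccion_de_trabajos_alt trabajos_tranquilos trabajos_estresantes

instance (trabajos_tranquilos : List Int) (trabajos_estresantes : List Int) (out : Int × List String) :
    Decidable (Spec_seleccion_de_trabajos trabajos_tranquilos trabajos_estresantes out) := by
  unfold Spec_seleccion_de_trabajos; infer_instance

-- ===== CLAIM (what is proved, stated in full; the proofs are below) =====
def Claim_equal_seleccion_de_trabajos : Prop := ∀ (trabajos_tranquilos : List Int) (trabajos_estresantes : List Int), Dom_seleccion_de_trabajos trabajos_tranquilos trabajos_estresantes → Pre_seleccion_de_trabajos trabajos_tranquilos trabajos_estresantes → Spec_seleccion_de_trabajos trabajos_tranquilos trabajos_estresantes (seleccion_de_trabajos trabajos_tranquilos trabajos_estresantes)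

-- ===== LEMMAS AND PROOFS =====

-- the DP value both programs compute for week j (opt[-1] := 0)
def pvOptSpec (t e : List Int) : Nat → Int
  | 0 => 0
  | 1 => max (t.getD 1 0) (e.getD 1 0)
  | (i + 2) => max (pvOptSpec t e (i + 1) + t.getD (i + 2) 0)
               (pvOptSpec t e i + e.getD (i + 2) 0)

-- the label both programs produce for week i (1 ≤ i)
def pvLbl (t e : List Int) (i : Nat) : String :=
  if pvOptSpec t e i = t.getD i 0 + pvOptSpec t e (i - 1) then
    String.ofList ('t' :: PySem.Int.toChars (i : Int))
  else
    String.ofList ('e' :: PySem.Int.toChars (i : Int))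

lemma pv_getD_set (xs : List Int) (k j : Nat) (v : Int) (hk : k < xs.length) :
    (xs.set k v).getD j 0 = if j = k then v else xs.getD j 0 := by
  rw [List.getD_eq_getElem?_getD, List.getD_eq_getElem?_getD, List.getElem?_set]
  split_ifs <;> first | rfl | omega

lemma pv_getD_map_range' (f : Nat → String) (m j : Nat) (d : String) (h : j < m) :
    ((List.range' 1 m).map f).getD j d = f (1 + j) := by
  rw [List.getD_eq_getElem?_getD]
  rw [List.getElem?_eq_getElem (by simpa using h)]
  simp [List.getElem_range']

lemma pv_set_map_range (f : Nat → Int) (n m : Nat) (_h : m < n) :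
    ((List.range n).map (fun j => if j < m then f j else 0)).set m (f m)
      = (List.range n).map (fun j => if j < m + 1 then f j else 0) := by
  apply List.ext_getElem
  · simp
  · intro i h1 h2
    simp only [List.getElem_set, List.getElem_map, List.getElem_range] at *
    split_ifs <;> simp_all <;> omega

lemma pv_fill_eq (t e : List Int) : ∀ m : Nat, 1 ≤ m →
    pvFillOpt t e m = (List.range m).map (pvOptSpec t e) := by
  intro m hm
  induction m with
  | zero => omega
  | succ m ih =>
    rcases Nat.lt_or_ge 1 (m + 1) with h1 | h1
    · -- m ≥ 1
      have hm1 : 1 ≤ m := by omega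
      have ihm := ih hm1
      unfold pvFillOpt at ihm ⊢
      have hcast : ((m + 1 : Nat) : Int) = (m : Int) + 1 := by push_cast; ring
      rw [hcast, PySem.List.pyRange_one_succ_right (by exact_mod_cast hm1), List.foldl_append, ihm]
      simp only [List.foldl_cons, List.foldl_nil]
      rw [List.range_succ, List.map_append]
      congr 1
      rcases Nat.lt_or_ge m 2 with h2 | h2
      · -- m = 1
        have : m = 1 := by omega
        subst this
        norm_num [pvOptSpec, PySem.List.pyGetD_ofNat']
      · -- m ≥ 2
        obtain ⟨k, rfl⟩ : ∃ k, m = k + 2 := ⟨m - 2, by omega⟩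
        have hc1 : ((k + 2 : Nat) : Int) - 1 = ((k + 1 : Nat) : Int) := by push_cast; ring
        have hc2 : ((k + 2 : Nat) : Int) - 2 = ((k : Nat) : Int) := by push_cast; ring
        rw [if_pos (by push_cast; omega), hc1, hc2]
        simp only [PySem.List.pyGetD_natCast]
        rw [PySem.List.getD_map_range _ _ _ _ (by omega), PySem.List.getD_map_range _ _ _ _ (by omega)]
        simp [pvOptSpec]
    · -- m + 1 = 1
      have : m = 0 := by omega
      subst this
      norm_num [pvFillOpt, pvOptSpec, PySem.List.pyRange]

lemma pv_loopA (t e : List Int) (n : Nat) (hn : 3 ≤ n) (hlen : t.length = n) :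
    ∀ m : Nat, 3 ≤ m → m ≤ n →
    (PySem.List.pyRange 3 (m : Int) 1).foldl (fun st i => pvElegir st.1 i st.2 t e)
      (pvElegirSegunda (pvElegirPrimera (List.replicate n 0) [String.ofList ['0']] t e).1
        (pvElegirPrimera (List.replicate n 0) [String.ofList ['0']] t e).2 t e)
    = ((List.range n).map (fun j => if j < m then pvOptSpec t e j else 0),
       String.ofList ['0'] :: (List.range' 1 (m - 1)).map (pvLbl t e)) := by
  intro m hm3 hmn
  induction m with
  | zero => omega
  | succ m ih =>
    rcases Nat.lt_or_ge m 3 with h3 | h3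
    · -- base case m + 1 = 3
      have : m = 2 := by omega
      subst this
      have h30 : ((2 + 1 : Nat) : Int) = 3 := by norm_num
      rw [h30]
      have h31 : PySem.List.pyRange 3 3 = [] := rfl
      rw [h31, List.foldl_nil]
      have hv2 : max (pvOptSpec t e 1 + t.getD 2 0) (e.getD 2 0) = pvOptSpec t e 2 := by
        simp [pvOptSpec]
      -- evaluate the second-week helper once, for either first-week log
      have hseg : ∀ lab : String,
          pvElegirSegunda ((List.replicate n (0:Int)).set 1 (pvOptSpec t e 1))
            ([String.ofList ['0']] ++ [lab]) t e
          = ((List.range n).map (fun j => if j < 3 then pvOptSpec t e j else 0),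
             [String.ofList ['0'], lab, pvLbl t e 2]) := by
        intro lab
        unfold pvElegirSegunda
        simp only [PySem.List.pyGetD_ofNat',
          PySem.List.pySetD_of_nonneg _ _ (by norm_num : (0:Int) ≤ 2)]
        have ht2 : ((2 : Int)).toNat = 2 := rfl
        rw [ht2]
        have e1 : ((List.replicate n (0:Int)).set 1 (pvOptSpec t e 1)).getD 1 0 = pvOptSpec t e 1 := by
          rw [pv_getD_set _ _ _ _ (by simp; omega)]
          simp
        rw [e1, hv2]
        set L1 := (List.replicate n (0:Int)).set 1 (pvOptSpec t e 1) with hL1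
        have hL1len : L1.length = n := by rw [hL1]; simp
        have e2 : (L1.set 2 (pvOptSpec t e 2)).getD 2 0 = pvOptSpec t e 2 := by
          rw [pv_getD_set _ _ _ _ (by omega)]
          simp
        have e3 : (L1.set 2 (pvOptSpec t e 2)).getD 1 0 = pvOptSpec t e 1 := by
          rw [pv_getD_set _ _ _ _ (by omega), if_neg (by omega), e1]
        rw [e2, e3]
        have e5 : L1.set 2 (pvOptSpec t e 2)
            = (List.range n).map (fun j => if j < 3 then pvOptSpec t e j else 0) := by
          apply List.ext_getElem
          · simp [hL1]
          · intro i h1 h2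
            simp only [hL1, List.getElem_set, List.getElem_map, List.getElem_range,
              List.getElem_replicate]
            rcases Nat.lt_or_ge i 3 with h4 | h4
            · interval_cases i <;> simp [pvOptSpec]
            · rw [if_neg (by omega), if_neg (by omega), if_neg (by omega)]
        rw [e5]
        split_ifs with hcb
        · refine Prod.ext rfl ?_
          simp only [List.cons_append, List.nil_append, List.cons.injEq, and_true, true_and]
          rw [pvLbl, if_pos (by simpa using hcb)]
          decide
        · refine Prod.ext rfl ?_
          simp only [List.cons_append, List.nil_append, List.cons.injEq, and_true, true_and]
          rw [pvLbl, if_neg (by simpa using hcb)]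
          decide
      unfold pvElegirPrimera
      simp only [PySem.List.pyGetD_ofNat',
        PySem.List.pySetD_of_nonneg _ _ (by norm_num : (0:Int) ≤ 1), Int.toNat_one]
      have hv1 : max (t.getD 1 0) (e.getD 1 0) = pvOptSpec t e 1 := rfl
      rw [hv1]
      have e1 : ((List.replicate n (0:Int)).set 1 (pvOptSpec t e 1)).getD 1 0 = pvOptSpec t e 1 := by
        rw [pv_getD_set _ _ _ _ (by simp; omega)]
        simp
      rw [e1]
      have hr2 : List.range' 1 (2 + 1 - 1) = [1, 2] := rfl
      rw [hr2]
      split_ifs with hca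
      · rw [hseg]
        refine Prod.ext rfl ?_
        simp only [List.map_cons, List.map_nil, List.cons.injEq, and_true, true_and]
        have hca' : pvOptSpec t e 1 = t.getD 1 0 + pvOptSpec t e (1 - 1) := by
          show pvOptSpec t e 1 = t.getD 1 0 + 0
          rw [add_zero]
          exact hca
        rw [pvLbl, if_pos hca']
        decide
      · rw [hseg]
        refine Prod.ext rfl ?_
        simp only [List.map_cons, List.map_nil, List.cons.injEq, and_true, true_and]
        have hca' : ¬ (pvOptSpec t e 1 = t.getD 1 0 + pvOptSpec t e (1 - 1)) := by
          intro h
          have h' : pvOptSpec t e 1 = t.getD 1 0 + 0 := h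
          rw [add_zero] at h'
          exact hca h'
        rw [pvLbl, if_neg hca']
        decide
    · -- step: m ≥ 3
      have ihm := ih h3 (by omega)
      have hcast : ((m + 1 : Nat) : Int) = (m : Int) + 1 := by push_cast; ring
      rw [hcast, PySem.List.pyRange_one_succ_right (by exact_mod_cast h3), List.foldl_append, ihm]
      simp only [List.foldl_cons, List.foldl_nil]
      obtain ⟨k, rfl⟩ : ∃ k, m = k + 3 := ⟨m - 3, by omega⟩
      unfold pvElegir
      have hc1 : ((k + 3 : Nat) : Int) - 1 = ((k + 2 : Nat) : Int) := by push_cast; ring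
      have hc2 : ((k + 3 : Nat) : Int) - 2 = ((k + 1 : Nat) : Int) := by push_cast; ring
      simp only [hc1, hc2, PySem.List.pySetD_natCast, PySem.List.pyGetD_natCast]
      set L := (List.range n).map (fun j => if j < k + 3 then pvOptSpec t e j else 0) with hL
      have hLlen : L.length = n := by rw [hL]; simp
      have e1 : L.getD (k + 2) 0 = pvOptSpec t e (k + 2) := by
        rw [hL, PySem.List.getD_map_range _ _ _ _ (by omega)]
        simp
      have e2 : L.getD (k + 1) 0 = pvOptSpec t e (k + 1) := by
        rw [hL, PySem.List.getD_map_range _ _ _ _ (by omega)]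
        simp
      simp only [e1, e2]
      have hv : max (pvOptSpec t e (k + 2) + t.getD (k + 3) 0) (pvOptSpec t e (k + 1) + e.getD (k + 3) 0)
          = pvOptSpec t e (k + 3) := rfl
      simp only [hv]
      have e3 : (L.set (k + 3) (pvOptSpec t e (k + 3))).getD (k + 3) 0 = pvOptSpec t e (k + 3) := by
        rw [pv_getD_set _ _ _ _ (by omega)]
        simp
      have e4 : (L.set (k + 3) (pvOptSpec t e (k + 3))).getD (k + 2) 0 = pvOptSpec t e (k + 2) := by
        rw [pv_getD_set _ _ _ _ (by omega), if_neg (by omega), e1]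
      simp only [e3, e4]
      have e5 : L.set (k + 3) (pvOptSpec t e (k + 3))
          = (List.range n).map (fun j => if j < k + 3 + 1 then pvOptSpec t e j else 0) := by
        rw [hL, pv_set_map_range _ _ _ (by omega)]
      have hsel : (List.range' 1 (k + 3 + 1 - 1)).map (pvLbl t e)
          = (List.range' 1 (k + 3 - 1)).map (pvLbl t e) ++ [pvLbl t e (k + 3)] := by
        have h9 : k + 3 + 1 - 1 = (k + 2) + 1 := by omega
        rw [h9, List.range'_1_concat, List.map_append]
        have h10 : 1 + (k + 2) = k + 3 := by omega
        rw [h10]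
        norm_num
      rw [e5, hsel]
      split_ifs with hc
      · refine Prod.ext rfl ?_
        simp only [List.cons_append]
        congr 1
        congr 1
        rw [pvLbl, if_pos (by simpa using hc)]
      · refine Prod.ext rfl ?_
        simp only [List.cons_append]
        congr 1
        congr 1
        rw [pvLbl, if_neg (by simpa using hc)]

lemma pv_head_t (cs : List Char) : PySem.Str.pyGet? (String.ofList ('t' :: cs)) 0 = some 't' := by
  simp [PySem.Str.pyGet?]

lemma pv_head_e (cs : List Char) : PySem.Str.pyGet? (String.ofList ('e' :: cs)) 0 = some 'e' := by
  simp [PySem.Str.pyGet?]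

lemma pv_back (t e : List Int) (n : Nat) (hn : 3 ≤ n) :
    ∀ i, i ≤ n - 1 →
    pvAjustarAux (String.ofList ['0'] :: (List.range' 1 (n - 1)).map (pvLbl t e)) i
      = pvBacktrack ((List.range n).map (pvOptSpec t e)) t i := by
  intro i
  induction i using Nat.strong_induction_on with
  | _ i ih =>
    intro hi
    match i with
    | 0 => rfl
    | 1 =>
      rw [pvAjustarAux, pvBacktrack]
      simp only [PySem.List.pyGetD_ofNat', List.getD_cons_succ]
      rw [pv_getD_map_range' _ _ _ _ (by omega)]
      rw [PySem.List.getD_map_range _ _ _ _ (by omega), PySem.List.getD_map_range _ _ _ _ (by omega)]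
      rw [ite_self]
      rw [pvLbl]
      split_ifs <;> rfl
    | (k + 2) =>
      rw [pvAjustarAux, pvBacktrack]
      have hc1 : ((k : Nat) : Int) + 2 = ((k + 2 : Nat) : Int) := by push_cast; ring
      have hc2 : ((k : Nat) : Int) + 1 = ((k + 1 : Nat) : Int) := by push_cast; ring
      simp only [hc1, hc2, PySem.List.pyGetD_natCast, List.getD_cons_succ]
      rw [pv_getD_map_range' _ _ _ _ (by omega)]
      have h12 : 1 + (k + 1) = k + 2 := by omega
      rw [h12]
      rw [PySem.List.getD_map_range _ _ _ _ (by omega), PySem.List.getD_map_range _ _ _ _ (by omega)]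
      by_cases hc : pvOptSpec t e (k + 2) = t.getD (k + 2) 0 + pvOptSpec t e (k + 1)
      · have hlbl : pvLbl t e (k + 2) = String.ofList ('t' :: PySem.Int.toChars ((k + 2 : Nat) : Int)) := by
          rw [pvLbl, if_pos (by simpa using hc)]
        rw [hlbl, if_pos hc, if_neg (by rw [pv_head_t]; simp)]
        rw [ih (k + 1) (by omega) (by omega)]
      · have hlbl : pvLbl t e (k + 2) = String.ofList ('e' :: PySem.Int.toChars ((k + 2 : Nat) : Int)) := by
          rw [pvLbl, if_neg (by simpa using hc)]
        rw [hlbl, if_neg hc, if_pos (by rw [pv_head_e])]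
        rw [ih k (by omega) (by omega)]

-- ===== VERDICT (by name: the statement is the Claim_ definition above) =====
theorem seleccion_de_trabajos_spec : Claim_equal_seleccion_de_trabajos := by
  intro tt te hdom hpre
  obtain ⟨h2, hle⟩ := hpre
  unfold Spec_seleccion_de_trabajos
  simp only [seleccion_de_trabajos, seleccion_de_trabajos_alt]
  set t := (0:Int) :: tt with ht
  set e := (0:Int) :: te with he
  have hn3 : 3 ≤ t.length := by rw [ht]; simp; omega
  set n := t.length with hn
  have hA := pv_loopA t e n hn3 rfl n hn3 (le_refl n)
  rw [hA]
  have hmap : (List.range n).map (fun j => if j < n then pvOptSpec t e j else 0)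
      = (List.range n).map (pvOptSpec t e) :=
    List.map_congr_left (fun j hj => if_pos (List.mem_range.mp hj))
  rw [hmap]
  rw [pv_fill_eq t e n (by omega)]
  refine Prod.ext rfl ?_
  show pvAjustar (String.ofList ['0'] :: (List.range' 1 (n - 1)).map (pvLbl t e))
      = (pvBacktrack ((List.range n).map (pvOptSpec t e)) t (n - 1)).reverse
  unfold pvAjustar
  have hlen : (String.ofList ['0'] :: (List.range' 1 (n - 1)).map (pvLbl t e)).length - 1 = n - 1 := by
    simp
  rw [hlen, pv_back t e n hn3 (n - 1) (le_refl _)]
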